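-- pv_equiv track=rewrite | github.com/andreitablan/Python | Laborator_6/main.py | censorship
-- ===== SOURCE A (Python) =====
-- def censorship(string):
--     string_to_return = ''
--     for index in range(0, len(string)):
--         if index % 2 != 0:
--             string_to_return = string_to_return + '*'
--         else:
--             string_to_return = string_to_return + string[index]
--     return string_to_return
-- ===== SOURCE B (Python) =====
-- def censorship(string):
--     evens = string[::2]
--     return ''.join(ch + '*' for ch in evens)[:len(string)]
-- ===== Notes on version B (the rewrite author's own statement) =====
-- stated objective: faster
-- what changed: Instead of looping over every index with a parity branch and growing the result by repeated string concatenation, B extracts the even-indexed characters with a step-2 slice, interleaves each with an asterisk via a single join, and truncates to the original length.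
import Mathlib
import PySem

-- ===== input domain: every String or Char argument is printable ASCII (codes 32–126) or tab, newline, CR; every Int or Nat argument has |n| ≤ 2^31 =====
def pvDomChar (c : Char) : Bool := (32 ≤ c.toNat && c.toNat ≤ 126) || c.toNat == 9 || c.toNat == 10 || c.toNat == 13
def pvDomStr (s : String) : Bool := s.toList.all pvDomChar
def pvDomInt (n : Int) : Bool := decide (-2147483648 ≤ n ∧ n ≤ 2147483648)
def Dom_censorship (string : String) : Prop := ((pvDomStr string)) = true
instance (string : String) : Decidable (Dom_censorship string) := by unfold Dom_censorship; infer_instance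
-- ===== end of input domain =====

-- B replaces A's per-index parity loop by a step-2 slice, one join interleaving '*', and a final
-- truncation to the original length; objective: simpler.

-- ===== PORT A =====
-- for index in range(0, len(string)): if index % 2 != 0: acc += '*' else: acc += string[index]
def censorship (string : String) : String :=
  String.ofList ((PySem.List.pyRange 0 (PySem.Str.len string) 1).foldl
    (fun acc index =>
      acc ++ (if PySem.Int.mod index 2 ≠ 0 then ['*']
              -- string[index] is always in range in this loop; .elim [] [·] is exact there
              else (PySem.Chars.pyGet? string.toList index).elim [] (fun c => [c]))) [])

-- ===== PORT B =====
-- evens = string[::2]; return ''.join(ch + '*' for ch in evens)[:len(string)]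
def censorship_alt (string : String) : String :=
  let evens := (PySem.Chars.slice? string.toList none none 2).getD []
  let joined := PySem.Chars.join [] (evens.map (fun ch => [ch, '*']))
  String.ofList (PySem.List.slice joined none (some (PySem.Str.len string)))

-- ===== PRECONDITION & SPEC =====
def Spec_censorship (string : String) (out : String) : Prop := out = censorship_alt string
instance (string : String) (out : String) : Decidable (Spec_censorship string out) := by unfold Spec_censorship; infer_instance

-- ===== CLAIM (what is proved, stated in full; the proofs are below) =====
def Claim_equal_censorship : Prop := ∀ (string : String), Dom_censorship string → Spec_censorship string (censorship string)

-- ===== LEMMAS AND PROOFS =====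

-- two-at-a-time induction principle on lists
theorem twoStep {α : Type} {P : List α → Prop} (h0 : P []) (h1 : ∀ a, P [a])
    (h2 : ∀ a b t, P t → P (a :: b :: t)) : ∀ cs, P cs
  | [] => h0
  | [a] => h1 a
  | a :: b :: t => h2 a b t (twoStep h0 h1 h2 t)

-- the common canonical result: every odd-index character replaced by '*'
def gA (cs : List Char) : List Char :=
  match cs with
  | [] => []
  | [a] => [a]
  | a :: _ :: t => a :: '*' :: gA t

-- the even-indexed characters (what string[::2] yields)
def evensOf (cs : List Char) : List Char :=
  match cs with
  | [] => []
  | [a] => [a]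
  | a :: _ :: t => a :: evensOf t

theorem flatMap_range_two (f : Nat → List Char) (n : Nat) :
    (List.range (n+1+1)).flatMap f = f 0 ++ f 1 ++ (List.range n).flatMap (fun k => f (k+2)) := by
  rw [List.range_succ_eq_map, List.range_succ_eq_map]
  simp only [List.flatMap_cons, List.flatMap_map]
  simp [Nat.succ_eq_add_one, List.append_assoc]

-- characterisation of A's loop body over the index range
theorem L1 (cs : List Char) :
    (List.range cs.length).flatMap
      (fun (k : Nat) => if PySem.Int.mod ((k : Int)) 2 ≠ 0 then ['*']
                else (PySem.List.pyGet? cs ((k : Int))).elim [] (fun c => [c])) = gA cs := by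
  induction cs using twoStep with
  | h0 => rfl
  | h1 a => simp [gA]
  | h2 a b t ih =>
    rw [show (a::b::t).length = t.length + 1 + 1 from rfl, flatMap_range_two]
    rw [show gA (a::b::t) = a :: '*' :: gA t from rfl, ← ih]
    have hc : ∀ k ∈ List.range t.length,
        (if PySem.Int.mod ((k+2 : Nat) : Int) 2 ≠ 0 then ['*']
          else (PySem.List.pyGet? (a::b::t) ((k+2 : Nat) : Int)).elim [] (fun c => [c]))
        = (if PySem.Int.mod ((k:Nat) : Int) 2 ≠ 0 then ['*']
          else (PySem.List.pyGet? t ((k:Nat) : Int)).elim [] (fun c => [c])) := by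
      intro k _
      have hmod : PySem.Int.mod ((k+2 : Nat) : Int) 2 = PySem.Int.mod ((k:Nat):Int) 2 := by
        rw [PySem.Int.mod_eq_emod_of_pos (by norm_num), PySem.Int.mod_eq_emod_of_pos (by norm_num)]
        push_cast; omega
      rw [hmod]
      rw [show ((k+2 : Nat) : Int) = ((k+1 : Nat) : Int) + 1 by push_cast; ring,
          PySem.List.pyGet?_cons_succ,
          show ((k+1 : Nat) : Int) = ((k : Nat) : Int) + 1 by push_cast; ring,
          PySem.List.pyGet?_cons_succ]
    rw [List.flatMap_congr hc]
    simp

-- the filterMap core of xs[::2]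
theorem L2' (cs : List Char) :
    List.filterMap (fun k => cs[2*k]?) (List.range ((cs.length+1)/2)) = evensOf cs := by
  induction cs using twoStep with
  | h0 => rfl
  | h1 a => simp [evensOf]
  | h2 a b t ih =>
    rw [show ((a::b::t).length + 1)/2 = (t.length+1)/2 + 1 by simp; omega,
        List.range_succ_eq_map]
    simp only [List.filterMap_cons, List.filterMap_map]
    rw [show evensOf (a::b::t) = a :: evensOf t from rfl, ← ih]
    have hc : ∀ k ∈ List.range ((t.length+1)/2),
        (a::b::t)[2 * (k+1)]? = t[2*k]? := by
      intro k _
      simp [show 2*(k+1) = 2*k+1+1 by ring]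
    show _ = a :: List.filterMap (fun k => t[2*k]?) (List.range ((t.length+1)/2))
    rw [← List.filterMap_congr hc]
    simp [Function.comp]

-- xs[::2] is exactly the even-indexed characters
theorem L2 (cs : List Char) : PySem.List.slice? cs none none 2 = some (evensOf cs) := by
  rw [← L2' cs]
  simp only [PySem.List.slice?, PySem.List.sliceIndices, if_neg (by norm_num : ¬(2:Int)=0)]
  norm_num
  have hcnt : (if 0 < cs.length then (((cs.length:Int) + 2 - 1) / 2).toNat else 0) = (cs.length + 1)/2 := by
    split_ifs <;> omega
  rw [hcnt]
  apply List.filterMap_congr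
  intro k _
  congr 1

theorem L3 (cs : List Char) :
    ((evensOf cs).flatMap (fun c => [c, '*'])).take cs.length = gA cs := by
  induction cs using twoStep with
  | h0 => rfl
  | h1 a => rfl
  | h2 a b t ih => simp [evensOf, gA, ih]

theorem join_nil_flatten (ls : List (List Char)) :
    PySem.Chars.join [] ls = ls.flatten := by
  show ([] : List Char).intercalate ls = ls.flatten
  induction ls with
  | nil => rfl
  | cons h t ih =>
    cases t with
    | nil => simp [List.intercalate, List.intersperse]
    | cons b t2 =>
      simp only [List.intercalate, List.intersperse] at *
      simp_all

-- ===== VERDICT (by name: the statement is the Claim_ definition above) =====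
theorem censorship_spec : Claim_equal_censorship := by
  intro s _
  show censorship s = censorship_alt s
  unfold censorship censorship_alt
  rw [show PySem.Str.len s = (s.toList.length : Int) from rfl,
      PySem.List.pyRange_zero_natCast, List.foldl_map,
      PySem.List.foldl_append_eq_flatMap, List.nil_append]
  simp only [PySem.Chars.pyGet?_eq_listPyGet?, PySem.Chars.slice?_eq_listSlice?]
  rw [L1, L2, Option.getD_some, join_nil_flatten, ← List.flatMap_def,
      PySem.List.slice_to_natCast, L3]
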